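-- pv_equiv track=rewrite | github.com/neilsxD/justCodes | chod_forces/737_b.py | func
-- ===== SOURCE A (Python) =====
-- def func(n,k,arr):
--     if k == n  : return "Yes"
--     indarr = [[el,i] for i,el in enumerate(arr) ]
--     indarr.sort()
--     count = 1
--     for i in range(n-1):
--         if indarr[i][1] != indarr[i+1][1] -1 :
--             count+=1
--
--
--
--     if count<=k : return 'Yes'
--     else : return 'No'
-- ===== SOURCE B (Python) =====
-- def func(n, k, arr):
--     if k == n:
--         return "Yes"
--     L = len(arr)
--     def rank(j):
--         v = arr[j]
--         return sum(1 for i in range(L) if arr[i] < v or (arr[i] == v and i < j))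
--     # adjacent original indices whose sorted positions are consecutive and among the first n
--     m = sum(1 for j in range(L - 1) if rank(j) + 1 == rank(j + 1) < n)
--     count = n - m
--     return 'Yes' if count <= k else 'No'
-- ===== Notes on version B (the rewrite author's own statement) =====
-- stated objective: alternative
-- what changed: A sorts (value,index) pairs and scans the sorted list for index gaps; B never sorts: it computes each index's stable-sort position directly by counting lexicographically smaller elements (order statistics), counts original-adjacent index pairs whose ranks are consecutive within the first n sorted positions, and compares n minus that count to k.
-- outside the precondition, e.g. on func(-1, 0, []): A returns 'No', B returns 'Yes'
import Mathlib
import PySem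

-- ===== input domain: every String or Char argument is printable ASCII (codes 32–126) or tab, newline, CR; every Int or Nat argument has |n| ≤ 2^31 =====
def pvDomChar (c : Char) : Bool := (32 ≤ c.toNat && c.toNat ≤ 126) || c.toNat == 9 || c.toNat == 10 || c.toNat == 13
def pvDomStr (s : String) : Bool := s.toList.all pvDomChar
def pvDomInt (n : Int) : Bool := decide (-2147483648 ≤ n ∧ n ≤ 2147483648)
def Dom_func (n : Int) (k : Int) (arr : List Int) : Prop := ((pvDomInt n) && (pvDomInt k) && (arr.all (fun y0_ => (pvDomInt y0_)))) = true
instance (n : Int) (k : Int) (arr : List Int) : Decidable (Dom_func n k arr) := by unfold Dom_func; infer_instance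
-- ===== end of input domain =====

-- B removes the sort entirely: it computes each index's stable-sort position directly by counting
-- lexicographically smaller elements (order statistics), counts original-adjacent index pairs with
-- consecutive ranks, and compares n minus that count to k ('alternative': no sorting, O(n^2)).

-- ===== PORT A =====
def func (n : Int) (k : Int) (arr : List Int) : String :=
  if k = n then "Yes"
  else
    -- indarr = [[el,i] for i,el in enumerate(arr)]; indarr.sort()  (lists compare lexicographically)
    let indarr := PySem.List.sorted2
      ((PySem.List.enumerate arr).map (fun p => (p.2, p.1))) (fun x => x.1) (fun x => x.2)
    let count := (PySem.List.pyRange 0 (n - 1) 1).foldl (fun count i =>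
      if (PySem.List.pyGetD indarr i (0, 0)).2 ≠ (PySem.List.pyGetD indarr (i + 1) (0, 0)).2 - 1
      then count + 1 else count) 1
    if count ≤ k then "Yes" else "No"

-- ===== PORT B =====
def func_alt (n : Int) (k : Int) (arr : List Int) : String :=
  if k = n then "Yes"
  else
    let L := (arr.length : Int)
    -- rank(j) = sum(1 for i in range(L) if arr[i] < v or (arr[i] == v and i < j)) with v = arr[j]
    let rank := fun (j : Int) =>
      let v := PySem.List.pyGetD arr j 0
      ((PySem.List.pyRange 0 L 1).map (fun i =>
        if PySem.List.pyGetD arr i 0 < v ∨ (PySem.List.pyGetD arr i 0 = v ∧ i < j)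
        then (1 : Int) else 0)).sum
    -- m = sum(1 for j in range(L-1) if rank(j) + 1 == rank(j+1) < n)
    let m := ((PySem.List.pyRange 0 (L - 1) 1).map (fun j =>
      if rank j + 1 = rank (j + 1) ∧ rank (j + 1) < n then (1 : Int) else 0)).sum
    let count := n - m
    if count ≤ k then "Yes" else "No"

-- ===== PRECONDITION & SPEC =====
-- Pre_ excludes the degenerate corners outside 0 <= n <= len(arr) where A raises IndexError
-- (2 <= n > len(arr), k != n) or where A's empty range(n-1) scan returns the accidental
-- count 1 that disagrees with B's n-based count (n <= 1 with n <= k < 1).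
def Pre_func (n : Int) (k : Int) (arr : List Int) : Prop :=
  (0 ≤ n ∧ n ≤ (arr.length : Int)) ∨ k = n ∨ (n ≤ 1 ∧ (k < n ∨ 1 ≤ k))
instance (n : Int) (k : Int) (arr : List Int) : Decidable (Pre_func n k arr) := by unfold Pre_func; infer_instance
def pvWitness_func : Int × Int × List Int := (3, 1, [5, 3, 4])
def Spec_func (n : Int) (k : Int) (arr : List Int) (out : String) : Prop := out = func_alt n k arr
instance (n : Int) (k : Int) (arr : List Int) (out : String) : Decidable (Spec_func n k arr out) := by unfold Spec_func; infer_instance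

-- ===== CLAIM (what is proved, stated in full; the proofs are below) =====
def Claim_equal_func : Prop := ∀ (n : Int) (k : Int) (arr : List Int), Dom_func n k arr → Pre_func n k arr → Spec_func n k arr (func n k arr)

-- ===== LEMMAS AND PROOFS =====

-- A's lexicographic comparator on (value, index) pairs.
def pvLex (a b : Int × Int) : Bool :=
  decide (a.1 < b.1) || (!decide (b.1 < a.1) && decide (a.2 < b.2))

-- B's value-only comparator, seen on the pairs.
def pvFst (a b : Int × Int) : Bool := decide (a.1 < b.1)

-- the strict lexicographic order on indices that the stable sort realises
def pvLtB (arr : List Int) (a b : Int) : Bool :=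
  decide (PySem.List.pyGetD arr a 0 < PySem.List.pyGetD arr b 0
    ∨ (PySem.List.pyGetD arr a 0 = PySem.List.pyGetD arr b 0 ∧ a < b))

-- One insertion step: when the inserted pair's index exceeds every index already present,
-- the lexicographic tie-break never fires.
theorem pv_insert_lex_eq_fst (x : Int × Int) (acc : List (Int × Int))
    (h : ∀ y ∈ acc, y.2 < x.2) :
    PySem.List.insertBy pvLex x acc = PySem.List.insertBy pvFst x acc := by
  induction acc with
  | nil => rfl
  | cons y ys ih =>
    have hy : y.2 < x.2 := h y (List.mem_cons_self)
    have hlex : pvLex x y = pvFst x y := by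
      simp [pvLex, pvFst]
      omega
    simp only [PySem.List.insertBy, hlex]
    by_cases hb : pvFst x y = true
    · simp [hb]
    · simp [hb, ih (fun z hz => h z (List.mem_cons_of_mem _ hz))]

-- Folding the two comparators over a list whose indices are strictly increasing gives the same list.
theorem pv_foldl_lex_eq_fst (L : List (Int × Int)) :
    ∀ acc : List (Int × Int), L.Pairwise (fun a b => a.2 < b.2) →
    (∀ y ∈ acc, ∀ x ∈ L, y.2 < x.2) →
    L.foldl (fun a x => PySem.List.insertBy pvLex x a) acc
      = L.foldl (fun a x => PySem.List.insertBy pvFst x a) acc := by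
  induction L with
  | nil => intro acc _ _; rfl
  | cons x L ih =>
    intro acc hL hacc
    have hstep : PySem.List.insertBy pvLex x acc = PySem.List.insertBy pvFst x acc :=
      pv_insert_lex_eq_fst x acc (fun y hy => hacc y hy x List.mem_cons_self)
    simp only [List.foldl_cons, hstep]
    apply ih _ (hL.sublist (List.sublist_cons_self x L))
    intro y hy z hz
    rcases (PySem.List.mem_insertBy pvFst x y acc).1 hy with rfl | hy'
    · exact (List.pairwise_cons.1 hL).1 z hz
    · exact hacc y hy' z (List.mem_cons_of_mem _ hz)

-- insertBy commutes with mapping f when the comparators correspond through f.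
theorem pv_insertBy_map {α β : Type} (f : α → β) (bf : α → α → Bool) (bf' : β → β → Bool)
    (hcor : ∀ a b, bf' (f a) (f b) = bf a b) (x : α) (ys : List α) :
    PySem.List.insertBy bf' (f x) (ys.map f) = (PySem.List.insertBy bf x ys).map f := by
  induction ys with
  | nil => rfl
  | cons y ys ih =>
    simp only [List.map_cons, PySem.List.insertBy, hcor]
    by_cases hb : bf x y = true
    · simp [hb]
    · simp [hb, ih]

theorem pv_foldl_insertBy_map {α β : Type} (f : α → β) (bf : α → α → Bool) (bf' : β → β → Bool)
    (hcor : ∀ a b, bf' (f a) (f b) = bf a b) (xs : List α) (acc : List α) :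
    (xs.map f).foldl (fun a x => PySem.List.insertBy bf' x a) (acc.map f)
      = (xs.foldl (fun a x => PySem.List.insertBy bf x a) acc).map f := by
  induction xs generalizing acc with
  | nil => rfl
  | cons x xs ih =>
    simp only [List.map_cons, List.foldl_cons, pv_insertBy_map f bf bf' hcor]
    exact ih _

theorem pv_enum_get? {α : Type} (arr : List α) : ∀ (s : Int) (t : Nat),
    (PySem.List.enumerate arr s)[t]? = arr[t]?.map (fun a => ((s + t : Int), a)) := by
  induction arr with
  | nil => intro s t; simp [PySem.List.enumerate_nil]
  | cons x xs ih =>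
    intro s t
    rw [PySem.List.enumerate_cons]
    cases t with
    | zero => simp
    | succ t => simp [ih (s + 1) t]; ring_nf

-- the pair list A sorts is the image of range(len(arr)) under i ↦ (arr[i], i)
theorem pv_enum_swap_eq_range_map (arr : List Int) :
    (PySem.List.enumerate arr).map (fun p => (p.2, p.1))
      = (PySem.List.pyRange 0 (arr.length : Int) 1).map
          (fun i => (PySem.List.pyGetD arr i 0, i)) := by
  apply List.ext_getElem?
  intro t
  rw [List.getElem?_map, List.getElem?_map, pv_enum_get?]
  by_cases ht : t < arr.length
  · rw [PySem.List.getElem?_pyRange_one 0 (arr.length : Int) t, if_pos (by omega)]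
    rw [List.getElem?_eq_getElem ht]
    simp [PySem.List.pyGetD_natCast, List.getD_eq_getElem?_getD, List.getElem?_eq_getElem ht]
  · rw [List.getElem?_eq_none (by omega), List.getElem?_eq_none]
    · simp
    · simp [PySem.List.length_pyRange_one]; omega

-- B's (implicit) sorted index permutation: the order the ranks enumerate
def pvP (arr : List Int) : List Int :=
  PySem.List.sorted (PySem.List.pyRange 0 (arr.length : Int) 1)
    (fun i => PySem.List.pyGetD arr i 0)

-- A's sorted pair list is the index list pvP mapped through i ↦ (arr[i], i).
theorem pv_indarr_eq (arr : List Int) :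
    PySem.List.sorted2 ((PySem.List.enumerate arr).map (fun p => (p.2, p.1)))
        (fun x => x.1) (fun x => x.2)
      = (pvP arr).map (fun i => (PySem.List.pyGetD arr i 0, i)) := by
  have h1 : PySem.List.sorted2 ((PySem.List.enumerate arr).map (fun p => (p.2, p.1)))
        (fun x => x.1) (fun x => x.2)
      = ((PySem.List.enumerate arr).map (fun p => (p.2, p.1))).foldl
          (fun a x => PySem.List.insertBy pvLex x a) [] := rfl
  have h2 : pvP arr = (PySem.List.pyRange 0 (arr.length : Int) 1).foldl
      (fun a x => PySem.List.insertBy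
        (fun a b => decide (PySem.List.pyGetD arr a 0 < PySem.List.pyGetD arr b 0)) x a) [] := rfl
  rw [h1, pv_enum_swap_eq_range_map arr]
  rw [pv_foldl_lex_eq_fst _ []
    (by rw [List.pairwise_map]; exact PySem.List.pairwise_lt_pyRange_one 0 _) (by simp)]
  rw [h2]
  have := pv_foldl_insertBy_map (fun i => (PySem.List.pyGetD arr i 0, i))
      (fun a b => decide (PySem.List.pyGetD arr a 0 < PySem.List.pyGetD arr b 0)) pvFst
      (fun a b => rfl) (PySem.List.pyRange 0 (arr.length : Int) 1) []
  simpa using this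

-- inserting an index larger than all present keeps the list pairwise-lex-increasing
theorem pv_insertBy_pairwise (arr : List Int) (x : Int) (acc : List Int)
    (hp : acc.Pairwise (fun a b => pvLtB arr a b = true))
    (hlt : ∀ y ∈ acc, y < x) :
    (PySem.List.insertBy
        (fun a b => decide (PySem.List.pyGetD arr a 0 < PySem.List.pyGetD arr b 0)) x
        acc).Pairwise (fun a b => pvLtB arr a b = true) := by
  induction acc with
  | nil => simp [PySem.List.insertBy]
  | cons y ys ih =>
    have hpc := List.pairwise_cons.1 hp
    have hyx : y < x := hlt y List.mem_cons_self
    simp only [PySem.List.insertBy]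
    by_cases hb : decide (PySem.List.pyGetD arr x 0 < PySem.List.pyGetD arr y 0) = true
    · simp only [hb, if_true]
      refine List.pairwise_cons.2 ⟨?_, hp⟩
      intro z hz
      rcases List.mem_cons.1 hz with rfl | hz
      · simp only [pvLtB, decide_eq_true_eq] at hb ⊢
        omega
      · have := hpc.1 z hz
        simp only [pvLtB, decide_eq_true_eq] at hb this ⊢
        omega
    · simp only [hb]
      refine List.pairwise_cons.2 ⟨?_, ih hpc.2 (fun z hz => hlt z (List.mem_cons_of_mem _ hz))⟩
      intro z hz
      rcases (PySem.List.mem_insertBy _ x z ys).1 hz with rfl | hz'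
      · simp only [pvLtB, decide_eq_true_eq, not_lt] at hb ⊢
        omega
      · exact hpc.1 z hz'
theorem pv_foldl_insertBy_pairwise (arr : List Int) (L : List Int) :
    ∀ acc : List Int, L.Pairwise (· < ·) →
    acc.Pairwise (fun a b => pvLtB arr a b = true) →
    (∀ y ∈ acc, ∀ x ∈ L, y < x) →
    (L.foldl (fun a x => PySem.List.insertBy
        (fun a b => decide (PySem.List.pyGetD arr a 0 < PySem.List.pyGetD arr b 0)) x a)
      acc).Pairwise (fun a b => pvLtB arr a b = true) := by
  induction L with
  | nil => intro acc _ hacc _; exact hacc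
  | cons x L ih =>
    intro acc hL hacc hord
    simp only [List.foldl_cons]
    apply ih _ (List.pairwise_cons.1 hL).2
    · exact pv_insertBy_pairwise arr x acc hacc (fun y hy => hord y hy x List.mem_cons_self)
    · intro y hy z hz
      rcases (PySem.List.mem_insertBy _ x y acc).1 hy with rfl | hy'
      · exact (List.pairwise_cons.1 hL).1 z hz
      · exact hord y hy' z (List.mem_cons_of_mem _ hz)

-- the sorted index list is pairwise strictly lex-increasing (value, then index: stability)
theorem pv_pvP_pairwise (arr : List Int) :
    (pvP arr).Pairwise (fun a b => pvLtB arr a b = true) := by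
  have h2 : pvP arr = (PySem.List.pyRange 0 (arr.length : Int) 1).foldl
      (fun a x => PySem.List.insertBy
        (fun a b => decide (PySem.List.pyGetD arr a 0 < PySem.List.pyGetD arr b 0)) x a) [] := rfl
  rw [h2]
  exact pv_foldl_insertBy_pairwise arr _ []
    (PySem.List.pairwise_lt_pyRange_one 0 _) (by simp) (by simp)

-- in a pairwise strictly ordered list, the number of elements below the pos-th IS pos
theorem pv_countP_pairwise (R : Int → Int → Bool) (hasym : ∀ a b, R a b = true → R b a = false) :
    ∀ (L : List Int), L.Pairwise (fun a b => R a b = true) →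
    ∀ (pos : Nat) (h : pos < L.length),
      L.countP (fun x => R x (L[pos])) = pos := by
  intro L
  induction L with
  | nil => intro _ pos h; simp at h
  | cons y ys ih =>
    intro hp pos h
    have hpc := List.pairwise_cons.1 hp
    cases pos with
    | zero =>
      simp only [List.getElem_cons_zero, List.countP_cons]
      have hyy : R y y = false := by
        by_cases hc : R y y = true
        · have := hasym y y hc; rw [this] at hc; exact absurd hc (by simp)
        · simpa using hc
      have hz0 : List.countP (fun x => R x y) ys = 0 :=
        List.countP_eq_zero.2 (fun z hz => by simp [hasym y z (hpc.1 z hz)])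
      simp [hyy, hz0]
    | succ pos =>
      have h' : pos < ys.length := by simpa using h
      simp only [List.getElem_cons_succ, List.countP_cons]
      have hm : ys[pos] ∈ ys := List.getElem_mem h'
      rw [ih hpc.2 pos h', hpc.1 _ hm]
      simp

theorem pv_card_filter_range (m : Nat) (q : Nat → Bool) :
    ((Finset.range m).filter (fun i => q i = true)).card = (List.range m).countP q := by
  rw [List.countP_eq_length_filter]
  simp [Finset.card, Finset.filter, Finset.range, Multiset.range, Multiset.filter_coe]

-- the central bijection: adjacent sorted positions (within the first N) carrying consecutive
-- original indices correspond one-to-one to adjacent original indices carrying consecutive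
-- ranks below N
theorem pv_count_adj (P : List Int) (rk : Int → Int) (N : Nat) (hNle : N ≤ P.length)
    (hmem : ∀ x, x ∈ P ↔ 0 ≤ x ∧ x < (P.length : Int))
    (hrk : ∀ (pos : Nat) (h : pos < P.length), rk P[pos] = (pos : Int)) :
    (List.range (N - 1)).countP
        (fun (i : Nat) => decide (P.getD (i + 1) 0 = P.getD i 0 + 1))
      = (List.range (P.length - 1)).countP
        (fun (j : Nat) => decide (rk (j : Int) + 1 = rk ((j : Int) + 1) ∧ rk ((j : Int) + 1) < (N : Int))) := by
  rw [← pv_card_filter_range, ← pv_card_filter_range]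
  have hget : ∀ {i : Nat} (h : i < P.length), P.getD i 0 = P[i]'h := by
    intro i h; exact List.getD_eq_getElem P 0 h
  have hbound : ∀ {i : Nat} (h : i < P.length), 0 ≤ P[i]'h ∧ P[i]'h < (P.length : Int) := by
    intro i h; exact (hmem _).1 (List.getElem_mem h)
  have hsurj : ∀ (j : Int), 0 ≤ j → j < (P.length : Int) →
      ∃ (pos : Nat) (h : pos < P.length), P[pos]'h = j := by
    intro j h1 h2
    obtain ⟨pos, h, he⟩ := List.getElem_of_mem ((hmem j).2 ⟨h1, h2⟩)
    exact ⟨pos, h, he⟩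
  apply Finset.card_bij' (fun i _ => (P.getD i 0).toNat) (fun j _ => (rk (j : Int)).toNat)
  · intro i hi
    simp only [Finset.mem_filter, Finset.mem_range, decide_eq_true_eq] at hi ⊢
    obtain ⟨him, hcond⟩ := hi
    have hi1 : i + 1 < P.length := by omega
    have hiL : i < P.length := by omega
    rw [hget hi1, hget hiL] at hcond
    have hb := hbound hiL
    have hb1 := hbound hi1
    have g1 : rk (P[i]'hiL) = (i : Int) := hrk i hiL
    have g2 : rk (P[i + 1]'hi1) = ((i : Int) + 1) := by
      have := hrk (i + 1) hi1; push_cast at this; exact this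
    refine ⟨?_, ?_, ?_⟩
    · rw [hget hiL]; omega
    · rw [hget hiL, Int.toNat_of_nonneg hb.1, g1, ← hcond, g2]
    · rw [hget hiL, Int.toNat_of_nonneg hb.1, ← hcond, g2]; omega
  · intro j hj
    simp only [Finset.mem_filter, Finset.mem_range, decide_eq_true_eq] at hj ⊢
    obtain ⟨hjm, hcond, hlt⟩ := hj
    obtain ⟨pos1, hpos1, he1⟩ := hsurj (j : Int) (by omega) (by omega)
    obtain ⟨pos2, hpos2, he2⟩ := hsurj ((j : Int) + 1) (by omega) (by omega)
    have hrk1 : rk (j : Int) = (pos1 : Int) := by rw [← he1, hrk pos1 hpos1]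
    have hrk2 : rk ((j : Int) + 1) = (pos2 : Int) := by rw [← he2, hrk pos2 hpos2]
    have hps : pos2 = pos1 + 1 := by rw [hrk1, hrk2] at hcond; omega
    have hlt' : pos1 + 1 < N := by
      rw [hrk2, hps] at hlt; exact_mod_cast hlt
    have hval : (rk (j : Int)).toNat = pos1 := by rw [hrk1]; omega
    subst hps
    refine ⟨by omega, ?_⟩
    rw [hval, hget (by omega : pos1 + 1 < P.length), hget hpos1, he1, he2]
  · intro i hi
    simp only [Finset.mem_filter, Finset.mem_range, decide_eq_true_eq] at hi
    obtain ⟨him, hcond⟩ := hi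
    have hiL : i < P.length := by omega
    have hb := hbound hiL
    rw [hget hiL, Int.toNat_of_nonneg hb.1, hrk i hiL]
    omega
  · intro j hj
    simp only [Finset.mem_filter, Finset.mem_range, decide_eq_true_eq] at hj
    obtain ⟨hjm, hcond, hlt⟩ := hj
    obtain ⟨pos1, hpos1, he1⟩ := hsurj (j : Int) (by omega) (by omega)
    have hrk1 : rk (j : Int) = (pos1 : Int) := by rw [← he1, hrk pos1 hpos1]
    have hval : (rk (j : Int)).toNat = pos1 := by rw [hrk1]; omega
    rw [hval, hget hpos1, he1]
    omega

-- 'if cond: count += 1' over a list is countP (cites PySem.List.foldl_count_if)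
theorem pv_foldl_count_ite (p : Int → Prop) [DecidablePred p] (l : List Int) (a : Int) :
    l.foldl (fun acc x => if p x then acc + 1 else acc) a
      = a + ((l.countP (fun x => decide (p x)) : Nat) : Int) := by
  simpa using PySem.List.foldl_count_if (fun x => decide (p x)) l a

-- 'sum(1 for x in l if cond)' is countP (cites PySem.List.sum_map_ite_one_zero)
theorem pv_sum_ite (p : Int → Prop) [DecidablePred p] (l : List Int) :
    (l.map (fun x => if p x then (1 : Int) else 0)).sum
      = ((l.countP (fun x => decide (p x)) : Nat) : Int) := by
  simpa using PySem.List.sum_map_ite_one_zero (fun x => decide (p x)) l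

theorem pv_countP_pyRange_zero (p : Int → Bool) (b : Int) :
    (PySem.List.pyRange 0 b 1).countP p = (List.range b.toNat).countP (fun (t : Nat) => p (t : Int)) := by
  rw [PySem.List.pyRange_one, List.countP_map]
  simp [Function.comp_def]

theorem pv_countP_not (q : Nat → Bool) (m : Nat) :
    (List.range m).countP (fun t => !q t) = m - (List.range m).countP q := by
  have h1 := List.length_eq_countP_add_countP q (l := List.range m)
  simp only [List.length_range] at h1
  have h2 : (List.range m).countP (fun a => ¬(q a = true)) = (List.range m).countP (fun t => !q t) := by
    apply List.countP_congr; intro x _; simp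
  omega

-- the shared count: among the first N sorted positions, adjacent ones with consecutive indices
def pvCn (arr : List Int) (N : Nat) : Nat :=
  (List.range (N - 1)).countP
    (fun (i : Nat) => decide ((pvP arr).getD (i + 1) 0 = (pvP arr).getD i 0 + 1))

theorem pv_lenP (arr : List Int) : (pvP arr).length = arr.length := by
  simp [pvP, PySem.List.length_sorted, PySem.List.length_pyRange_one]

theorem pv_memP (arr : List Int) (x : Int) : x ∈ pvP arr ↔ 0 ≤ x ∧ x < (arr.length : Int) := by
  rw [pvP, (PySem.List.sorted_perm _ _ _).mem_iff, PySem.List.mem_pyRange_one]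

theorem pv_funcA (arr : List Int) (n k : Int) (h0 : 0 ≤ n) (hnL : n ≤ (arr.length : Int))
    (hk : ¬ k = n) :
    func n k arr
      = if 1 + ((n.toNat - 1 - pvCn arr n.toNat : Nat) : Int) ≤ k then "Yes" else "No" := by
  simp only [func, if_neg hk, pv_indarr_eq arr]
  have hmm : (n - 1).toNat = n.toNat - 1 := by omega
  have hcnt : (PySem.List.pyRange 0 (n - 1) 1).foldl (fun count i =>
      if (PySem.List.pyGetD ((pvP arr).map (fun i => (PySem.List.pyGetD arr i 0, i))) i (0, 0)).2
          ≠ (PySem.List.pyGetD ((pvP arr).map (fun i => (PySem.List.pyGetD arr i 0, i))) (i + 1) (0, 0)).2 - 1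
      then count + 1 else count) 1
      = 1 + ((n.toNat - 1 - pvCn arr n.toNat : Nat) : Int) := by
    rw [pv_foldl_count_ite, pv_countP_pyRange_zero, hmm]
    have hcg : (List.range (n.toNat - 1)).countP
        (fun (t : Nat) => decide ((PySem.List.pyGetD ((pvP arr).map (fun i => (PySem.List.pyGetD arr i 0, i))) ((t : Int)) (0, 0)).2
          ≠ (PySem.List.pyGetD ((pvP arr).map (fun i => (PySem.List.pyGetD arr i 0, i))) ((t : Int) + 1) (0, 0)).2 - 1))
        = (List.range (n.toNat - 1)).countP
        (fun (t : Nat) => !(decide ((pvP arr).getD (t + 1) 0 = (pvP arr).getD t 0 + 1))) := by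
      apply List.countP_congr
      intro t ht
      rw [List.mem_range] at ht
      have ht1 : t < (pvP arr).length := by rw [pv_lenP]; omega
      have ht2 : t + 1 < (pvP arr).length := by rw [pv_lenP]; omega
      have e0 : PySem.List.pyGetD ((pvP arr).map (fun i => (PySem.List.pyGetD arr i 0, i))) ((t : Int)) (0, 0)
          = (PySem.List.pyGetD arr ((pvP arr)[t]'ht1) 0, (pvP arr)[t]'ht1) := by
        rw [PySem.List.pyGetD_natCast, List.getD_eq_getElem _ _ (by simpa using ht1), List.getElem_map]
      have e1 : PySem.List.pyGetD ((pvP arr).map (fun i => (PySem.List.pyGetD arr i 0, i))) ((t : Int) + 1) (0, 0)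
          = (PySem.List.pyGetD arr ((pvP arr)[t + 1]'ht2) 0, (pvP arr)[t + 1]'ht2) := by
        rw [show ((t : Int) + 1) = ((t + 1 : Nat) : Int) by push_cast; ring]
        rw [PySem.List.pyGetD_natCast, List.getD_eq_getElem _ _ (by simpa using ht2), List.getElem_map]
      rw [e0, e1]
      rw [List.getD_eq_getElem _ _ ht1, List.getD_eq_getElem _ _ ht2]
      simp only [decide_eq_true_eq, Bool.not_eq_true', decide_eq_false_iff_not]
      constructor <;> intro h' <;> omega
    rw [hcg, pv_countP_not]
    have hle : (List.range (n.toNat - 1)).countP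
        (fun (i : Nat) => decide ((pvP arr).getD (i + 1) 0 = (pvP arr).getD i 0 + 1))
        ≤ n.toNat - 1 := by
      have := List.countP_le_length
        (p := fun (i : Nat) => decide ((pvP arr).getD (i + 1) 0 = (pvP arr).getD i 0 + 1))
        (l := List.range (n.toNat - 1))
      simpa using this
    unfold pvCn
    omega
  simp only [hcnt]

-- B's rank expression, named: the order statistic of index j
def pvRk (arr : List Int) (j : Int) : Int :=
  (((PySem.List.pyRange 0 (arr.length : Int) 1).countP (fun i => pvLtB arr i j) : Nat) : Int)

-- the rank function inverts pvP: the j sitting at sorted position pos has rank pos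
theorem pv_rk_spec (arr : List Int) (pos : Nat) (h : pos < (pvP arr).length) :
    pvRk arr ((pvP arr)[pos]) = (pos : Int) := by
  unfold pvRk
  have hperm : (pvP arr).Perm (PySem.List.pyRange 0 (arr.length : Int) 1) :=
    PySem.List.sorted_perm _ _ _
  rw [← hperm.countP_eq]
  have hasym : ∀ a b, pvLtB arr a b = true → pvLtB arr b a = false := by
    intro a b hab
    simp only [pvLtB, decide_eq_true_eq, decide_eq_false_iff_not] at hab ⊢
    omega
  rw [pv_countP_pairwise (pvLtB arr) hasym (pvP arr) (pv_pvP_pairwise arr) pos h]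

theorem pv_funcB (arr : List Int) (n k : Int) (h0 : 0 ≤ n) (hnL : n ≤ (arr.length : Int))
    (hk : ¬ k = n) :
    func_alt n k arr
      = if n - ((pvCn arr n.toNat : Nat) : Int) ≤ k then "Yes" else "No" := by
  simp only [func_alt, if_neg hk]
  have hrank : ∀ j : Int,
      ((PySem.List.pyRange 0 (arr.length : Int) 1).map (fun i =>
        if PySem.List.pyGetD arr i 0 < PySem.List.pyGetD arr j 0
            ∨ (PySem.List.pyGetD arr i 0 = PySem.List.pyGetD arr j 0 ∧ i < j)
        then (1 : Int) else 0)).sum = pvRk arr j := by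
    intro j
    unfold pvRk
    exact pv_sum_ite (fun i => PySem.List.pyGetD arr i 0 < PySem.List.pyGetD arr j 0
      ∨ (PySem.List.pyGetD arr i 0 = PySem.List.pyGetD arr j 0 ∧ i < j)) _
  simp only [hrank]
  have hmm : ((arr.length : Int) - 1).toNat = arr.length - 1 := by omega
  have hadj := pv_count_adj (pvP arr) (pvRk arr) n.toNat
    (by rw [pv_lenP]; omega)
    (fun x => by rw [pv_memP, pv_lenP]) (fun pos h => pv_rk_spec arr pos h)
  rw [pv_lenP] at hadj
  have hm1 : ((PySem.List.pyRange 0 ((arr.length : Int) - 1) 1).map (fun j =>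
      if pvRk arr j + 1 = pvRk arr (j + 1) ∧ pvRk arr (j + 1) < n then (1 : Int) else 0)).sum
      = ((pvCn arr n.toNat : Nat) : Int) := by
    rw [pv_sum_ite, pv_countP_pyRange_zero, hmm]
    have hstep : (List.range (arr.length - 1)).countP
        (fun (t : Nat) => decide (pvRk arr ((t : Int)) + 1 = pvRk arr ((t : Int) + 1)
          ∧ pvRk arr ((t : Int) + 1) < n))
        = pvCn arr n.toNat := by
      unfold pvCn
      rw [hadj]
      apply List.countP_congr
      intro t _
      have : ((n.toNat : Nat) : Int) = n := by omega
      rw [this]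
    rw [hstep]
  rw [hm1]

-- ===== VERDICT (by name: the statement is the Claim_ definition above) =====
-- A with an empty scan: for n <= 1 the range(n-1) loop is empty and count stays 1
theorem pv_funcA_small (arr : List Int) (n k : Int) (hn1 : n ≤ 1) (hk : ¬ k = n) :
    func n k arr = if 1 ≤ k then "Yes" else "No" := by
  have he : PySem.List.pyRange 0 (n - 1) 1 = [] := by
    rw [PySem.List.pyRange_one, show (n - 1 - 0).toNat = 0 by omega]
    rfl
  simp only [func, if_neg hk, he, List.foldl_nil]

-- B with n <= 1: no rank can be both consecutive-after and below n, so m = 0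
theorem pv_funcB_small (arr : List Int) (n k : Int) (hn1 : n ≤ 1) (hk : ¬ k = n) :
    func_alt n k arr = if n ≤ k then "Yes" else "No" := by
  simp only [func_alt, if_neg hk]
  have hrank : ∀ j : Int,
      ((PySem.List.pyRange 0 (arr.length : Int) 1).map (fun i =>
        if PySem.List.pyGetD arr i 0 < PySem.List.pyGetD arr j 0
            ∨ (PySem.List.pyGetD arr i 0 = PySem.List.pyGetD arr j 0 ∧ i < j)
        then (1 : Int) else 0)).sum = pvRk arr j := by
    intro j
    unfold pvRk
    exact pv_sum_ite (fun i => PySem.List.pyGetD arr i 0 < PySem.List.pyGetD arr j 0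
      ∨ (PySem.List.pyGetD arr i 0 = PySem.List.pyGetD arr j 0 ∧ i < j)) _
  simp only [hrank]
  have hm0 : ((PySem.List.pyRange 0 ((arr.length : Int) - 1) 1).map (fun j =>
      if pvRk arr j + 1 = pvRk arr (j + 1) ∧ pvRk arr (j + 1) < n then (1 : Int) else 0)).sum
      = (0 : Int) := by
    rw [pv_sum_ite]
    have hz : (PySem.List.pyRange 0 ((arr.length : Int) - 1) 1).countP
        (fun j => decide (pvRk arr j + 1 = pvRk arr (j + 1) ∧ pvRk arr (j + 1) < n)) = 0 := by
      apply List.countP_eq_zero.2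
      intro j _
      have h1 : 0 ≤ pvRk arr j := by unfold pvRk; positivity
      have h2 : 0 ≤ pvRk arr (j + 1) := by unfold pvRk; positivity
      simp only [decide_eq_true_eq, not_and]
      omega
    rw [hz]
    rfl
  rw [hm0]
  have : n - 0 = n := by omega
  rw [this]

-- ===== the verdict proof =====
theorem func_spec : Claim_equal_func := by
  intro n k arr _ hpre
  unfold Spec_func
  by_cases hk : k = n
  · unfold func func_alt
    rw [if_pos hk, if_pos hk]
  · rcases hpre with ⟨h0, hnL⟩ | hkn | ⟨hn1, hkr⟩
    · rw [pv_funcA arr n k h0 hnL hk, pv_funcB arr n k h0 hnL hk]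
      have hC : pvCn arr n.toNat ≤ n.toNat - 1 := by
        have := List.countP_le_length
          (p := fun (i : Nat) => decide ((pvP arr).getD (i + 1) 0 = (pvP arr).getD i 0 + 1))
          (l := List.range (n.toNat - 1))
        simpa [pvCn] using this
      have hiff : (1 + ((n.toNat - 1 - pvCn arr n.toNat : Nat) : Int) ≤ k)
          ↔ (n - ((pvCn arr n.toNat : Nat) : Int) ≤ k) := by omega
      exact if_congr hiff rfl rfl
    · exact absurd hkn hk
    · rw [pv_funcA_small arr n k hn1 hk, pv_funcB_small arr n k hn1 hk]
      have hiff : (1 ≤ k) ↔ (n ≤ k) := by omega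
      exact if_congr hiff rfl rfl
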